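-- pv_equiv track=rewrite | github.com/wyk18703232953/myResearch | codeComplex/data/filteredData/python/np/python_np_0408.py | check
-- ===== SOURCE A (Python) =====
-- def check(val, A, M):
--     s = set()
--     for row in A:
--         v = 0
--         for u in row:
--             v <<= 1
--             if u >= val:
--                 v |= 1
--         s.add(v)
--
--     x = 1 << M
--     for u in s:
--         for v in range(x):
--             if v in s and (u | v) == x - 1:
--                 return True
--
--     return False
-- ===== SOURCE B (Python) =====
-- def _mask(val, row):
--     m = 0
--     for u in row:
--         m = 2 * m + (u >= val)
--     return m
--
--
-- def check(val, A, M):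
--     full = (1 << M) - 1
--     masks = {_mask(val, row) for row in A}
--     return any(u | v == full for u in masks for v in masks)
-- ===== Notes on version B (the rewrite author's own statement) =====
-- stated objective: alternative
-- what changed: Instead of scanning all 2^M values of range(1<<M) for a partner of each mask, B checks all pairs of the (at most |A|) distinct row masks directly.
import Mathlib
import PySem

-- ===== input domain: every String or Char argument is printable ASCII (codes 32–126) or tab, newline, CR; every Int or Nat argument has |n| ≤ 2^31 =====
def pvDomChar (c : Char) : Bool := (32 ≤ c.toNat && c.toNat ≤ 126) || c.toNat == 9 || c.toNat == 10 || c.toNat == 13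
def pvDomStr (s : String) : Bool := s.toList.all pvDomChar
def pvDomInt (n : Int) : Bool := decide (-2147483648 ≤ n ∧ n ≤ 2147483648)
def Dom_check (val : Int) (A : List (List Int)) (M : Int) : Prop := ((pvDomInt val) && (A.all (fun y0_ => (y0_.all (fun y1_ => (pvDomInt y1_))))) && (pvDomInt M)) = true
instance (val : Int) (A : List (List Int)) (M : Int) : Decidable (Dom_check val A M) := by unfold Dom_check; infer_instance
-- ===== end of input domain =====

-- B replaces A's scan of all 2^M candidate partners per mask by a direct check of all pairs of
-- the distinct row masks. Return value only; no mutation.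

-- ===== PORT A =====
-- mask values in Python are built from 0 by '<<' and '|= 1', hence always nonnegative:
-- they are represented as Nat (exact on the whole domain).
def rowMaskA (val : Int) (row : List Int) : Nat :=
  row.foldl (fun v u =>
    let v' := v <<< 1                        -- v <<= 1
    if u ≥ val then v' ||| 1 else v') 0      -- if u >= val: v |= 1

def check (val : Int) (A : List (List Int)) (M : Int) : Bool :=
  -- s = set(); for row in A: ... s.add(v)
  let s : PySem.Set Nat := A.foldl (fun s row => PySem.Set.add s (rowMaskA val row)) PySem.Set.empty
  -- x = 1 << M  (exact for 0 ≤ M = Pre_check; Python raises ValueError for M < 0)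
  let x : Nat := 1 <<< M.toNat
  -- for u in s: for v in range(x): if v in s and (u | v) == x - 1: return True
  -- (early 'return True' over a set = any; the Bool result is iteration-order independent)
  s.any (fun u => (List.range x).any (fun v => s.contains v && decide (u ||| v = x - 1)))

-- ===== PORT B =====
def rowMaskB (val : Int) (row : List Int) : Nat :=
  row.foldl (fun m u => 2 * m + (if u ≥ val then 1 else 0)) 0   -- m = 2*m + (u >= val)

def check_alt (val : Int) (A : List (List Int)) (M : Int) : Bool :=
  let full : Nat := (1 <<< M.toNat) - 1      -- full = (1 << M) - 1  (exact for 0 ≤ M = Pre_check)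
  let masks : PySem.Set Nat := PySem.Set.ofList (A.map (rowMaskB val))
  masks.any (fun u => masks.any (fun v => decide (u ||| v = full)))

-- ===== PRECONDITION & SPEC =====
-- Pre_check excludes only M < 0, where the Python A raises ValueError at '1 << M' (and B does too).
def Pre_check (val : Int) (A : List (List Int)) (M : Int) : Prop := 0 ≤ M
instance (val : Int) (A : List (List Int)) (M : Int) : Decidable (Pre_check val A M) := by unfold Pre_check; infer_instance
def pvWitness_check : Int × List (List Int) × Int := (1, [[1, 0], [0, 1]], 2)
def Spec_check (val : Int) (A : List (List Int)) (M : Int) (out : Bool) : Prop := out = check_alt val A M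
instance (val : Int) (A : List (List Int)) (M : Int) (out : Bool) : Decidable (Spec_check val A M out) := by unfold Spec_check; infer_instance

-- ===== CLAIM (what is proved, stated in full; the proofs are below) =====
def Claim_equal_check : Prop := ∀ (val : Int) (A : List (List Int)) (M : Int), Dom_check val A M → Pre_check val A M → Spec_check val A M (check val A M)

-- ===== LEMMAS AND PROOFS =====

theorem two_mul_or_one (v : Nat) : 2 * v ||| 1 = 2 * v + 1 := by
  apply Nat.eq_of_testBit_eq
  intro i
  cases i with
  | zero => simp [Nat.testBit_zero]
  | succ i =>
    rw [Nat.testBit_or, Nat.testBit_succ, Nat.testBit_succ, Nat.testBit_succ]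
    have h1 : (2 * v) / 2 = v := by omega
    have h2 : (2 * v + 1) / 2 = v := by omega
    have h3 : (1 : Nat) / 2 = 0 := by norm_num
    simp [h1, h2, h3]

theorem shiftLeft_one (v : Nat) : v <<< 1 = 2 * v := by
  rw [Nat.shiftLeft_eq]
  omega

theorem rowMask_eq (val : Int) (row : List Int) : rowMaskA val row = rowMaskB val row := by
  unfold rowMaskA rowMaskB
  have hstep : (fun (v : Nat) (u : Int) =>
      let v' := v <<< 1
      if u ≥ val then v' ||| 1 else v') =
      (fun (m : Nat) (u : Int) => 2 * m + (if u ≥ val then 1 else 0)) := by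
    funext v u
    by_cases h : u ≥ val <;> simp [h, shiftLeft_one, two_mul_or_one]
  rw [hstep]

theorem sets_eq (val : Int) (A : List (List Int)) :
    A.foldl (fun s row => PySem.Set.add s (rowMaskA val row)) PySem.Set.empty =
      PySem.Set.ofList (A.map (rowMaskB val)) := by
  rw [PySem.Set.ofList_eq_foldl, List.foldl_map]
  simp only [rowMask_eq]
  rfl

-- for each u, scanning range(2^m) for a partner v ∈ s equals scanning s itself:
-- any partner v with u ||| v = 2^m - 1 satisfies v ≤ 2^m - 1 < 2^m.
theorem inner_any_eq (s : List Nat) (u m : Nat) :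
    (List.range (2 ^ m)).any (fun v => s.contains v && decide (u ||| v = 2 ^ m - 1)) =
      s.any (fun v => decide (u ||| v = 2 ^ m - 1)) := by
  have hx : 1 ≤ 2 ^ m := Nat.one_le_two_pow
  rw [Bool.eq_iff_iff]
  simp only [List.any_eq_true, List.mem_range, Bool.and_eq_true, decide_eq_true_eq,
    List.contains_iff_mem]
  constructor
  · rintro ⟨v, _, hv, hor⟩
    exact ⟨v, hv, hor⟩
  · rintro ⟨v, hv, hor⟩
    refine ⟨v, ?_, hv, hor⟩
    have : v ≤ u ||| v := Nat.right_le_or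
    omega

-- ===== VERDICT (by name: the statement is the Claim_ definition above) =====
theorem check_spec : Claim_equal_check := by
  intro val A M _ _
  unfold Spec_check check check_alt
  rw [sets_eq val A, Nat.one_shiftLeft]
  dsimp only
  congr 1
  funext u
  exact inner_any_eq _ u M.toNat
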